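-- pv_equiv track=rewrite | github.com/natysls/grasp | main.py | avaliando_solucao
-- ===== SOURCE A (Python) =====
-- def avaliando_solucao(solution, clauses):
--     """Avalia quantas cláusulas são satisfeitas por uma solução (atribuição de valores às variáveis)."""
--     satisfatoria = 0
--     for clause in clauses:
--         for literal in clause:
--             var_index = abs(literal) - 1
--             if var_index >= len(solution):
--                 continue
--             # Se o literal é positivo e verdadeiro ou se é negativo e falso, a cláusula é satisfeita
--             if (literal > 0 and solution[var_index]) or (
--                 literal < 0 and not solution[var_index]
--             ):
--                 satisfatoria += 1
--                 break
--     return satisfatoria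
-- ===== SOURCE B (Python) =====
-- def avaliando_solucao(solution, clauses):
--     """Inverted index: literal -> clause indices; then one pass over the assignment
--     marks satisfied clauses in a boolean array, and the marks are summed."""
--     occ = {}
--     for ci, clause in enumerate(clauses):
--         for literal in clause:
--             occ.setdefault(literal, []).append(ci)
--     sat = [False] * len(clauses)
--     for i, value in enumerate(solution):
--         code = i + 1 if value else -(i + 1)
--         for ci in occ.get(code, []):
--             sat[ci] = True
--     return sum(sat)
-- ===== Notes on version B (the rewrite author's own statement) =====
-- stated objective: alternative
-- what changed: B inverts the loop structure: it builds an inverted index from literal to the clause indices containing it, then iterates over the assignment (not the clauses) marking satisfied clauses in a boolean array, and sums the marks; A scans each clause's literals with an early break.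
import Mathlib
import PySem

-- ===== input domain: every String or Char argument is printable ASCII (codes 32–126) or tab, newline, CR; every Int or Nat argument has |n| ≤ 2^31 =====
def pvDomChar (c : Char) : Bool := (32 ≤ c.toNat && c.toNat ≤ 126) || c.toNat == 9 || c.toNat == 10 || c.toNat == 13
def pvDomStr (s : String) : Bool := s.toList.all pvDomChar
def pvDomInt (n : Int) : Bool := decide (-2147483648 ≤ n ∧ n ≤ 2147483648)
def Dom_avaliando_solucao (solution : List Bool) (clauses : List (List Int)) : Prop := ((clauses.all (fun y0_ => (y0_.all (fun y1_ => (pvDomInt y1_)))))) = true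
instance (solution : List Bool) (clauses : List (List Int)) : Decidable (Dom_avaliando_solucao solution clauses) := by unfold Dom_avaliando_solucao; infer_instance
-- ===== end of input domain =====

-- B replaces A's clause-by-clause scan with an inverted index (literal -> clause indices) and a
-- marking pass over the assignment; equal results proved on all inputs (alternative structure, no speed claim).


-- ===== PORT A =====
-- the inner 'for literal in clause' loop with continue/break: true once a satisfying literal is found
-- (solution[var_index] is only reached when literal ≠ 0 and var_index < len, so pyGetD's default is never the value)
def aClauseSat (solution : List Bool) : List Int → Bool
  | [] => false
  | literal :: rest =>
    if decide ((|literal| - 1 : Int) ≥ (solution.length : Int)) then aClauseSat solution rest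
    else if (decide (literal > 0) && PySem.List.pyGetD solution (|literal| - 1) false)
         || (decide (literal < 0) && !(PySem.List.pyGetD solution (|literal| - 1) false)) then true
    else aClauseSat solution rest

def avaliando_solucao (solution : List Bool) (clauses : List (List Int)) : Int :=
  clauses.foldl (fun satisfatoria clause =>
    if aClauseSat solution clause then satisfatoria + 1 else satisfatoria) 0

-- ===== PORT B =====
-- occ.setdefault(literal, []).append(ci)  ==  occ[literal] = occ.get(literal, []) + [ci]
def altOcc (clauses : List (List Int)) : PySem.Dict Int (List Int) :=
  (PySem.List.enumerate clauses).foldl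
    (fun occ p => p.2.foldl (fun occ literal => occ.modify literal [] (· ++ [p.1])) occ)
    PySem.Dict.empty

def avaliando_solucao_alt (solution : List Bool) (clauses : List (List Int)) : Int :=
  let occ := altOcc clauses
  let sat := (PySem.List.enumerate solution).foldl
    (fun sat iv =>
      -- for ci in occ.get(code, []): sat[ci] = True   (ci is always a valid nonnegative index)
      (occ.getD (if iv.2 then iv.1 + 1 else -(iv.1 + 1)) []).foldl
        (fun s ci => PySem.List.pySetD s ci true) sat)
    (List.replicate clauses.length false)
  (sat.count true : Int)   -- sum(sat) over booleans

-- ===== PRECONDITION & SPEC =====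
def Spec_avaliando_solucao (solution : List Bool) (clauses : List (List Int)) (out : Int) : Prop := out = avaliando_solucao_alt solution clauses
instance (solution : List Bool) (clauses : List (List Int)) (out : Int) : Decidable (Spec_avaliando_solucao solution clauses out) := by unfold Spec_avaliando_solucao; infer_instance

-- ===== CLAIM (what is proved, stated in full; the proofs are below) =====
def Claim_equal_avaliando_solucao : Prop := ∀ (solution : List Bool) (clauses : List (List Int)), Dom_avaliando_solucao solution clauses → Spec_avaliando_solucao solution clauses (avaliando_solucao solution clauses)

-- ===== LEMMAS AND PROOFS =====

-- A's per-literal test is 'l is the code of some satisfied variable'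
lemma litTest_eq (bs : List Bool) (l : Int) :
    (decide ((|l| - 1 : Int) < (bs.length : Int)) &&
      ((decide (l > 0) && PySem.List.pyGetD bs (|l| - 1) false)
        || (decide (l < 0) && !(PySem.List.pyGetD bs (|l| - 1) false))))
    = decide (∃ i, i < bs.length ∧ l = (if bs.getD i false then ((i : Int) + 1) else -((i : Int) + 1))) := by
  rcases lt_trichotomy l 0 with hneg | hzero | hpos
  · have habs : |l| = -l := abs_of_neg hneg
    by_cases hlen : (-l - 1 : Int) < (bs.length : Int)
    · have hi : (-l - 1).toNat < bs.length := by omega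
      have hget : PySem.List.pyGetD bs (-l - 1) false = bs.getD (-l - 1).toNat false := by
        rw [PySem.List.pyGetD_eq_getElem bs (i := -l - 1) false (by omega) hlen]
        rw [List.getD_eq_getElem bs false hi]
      have hiff : (∃ i, i < bs.length ∧ l = (if bs.getD i false then ((i : Int) + 1) else -((i : Int) + 1)))
          ↔ bs.getD (-l - 1).toNat false = false := by
        constructor
        · rintro ⟨i, hilt, hl⟩
          by_cases hb : bs.getD i false = true
          · rw [hb] at hl; simp at hl; omega
          · have hb' : bs.getD i false = false := by simpa using hb
            rw [hb'] at hl; simp at hl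
            have : i = (-l - 1).toNat := by omega
            rw [← this]; exact hb'
        · intro hb
          exact ⟨(-l - 1).toNat, hi, by rw [hb]; simp; omega⟩
      have haux : ¬ (l > 0) := by omega
      rw [habs, hget, decide_eq_decide.mpr hiff]
      have hd : ∀ (b : Bool), (decide (-l - 1 < (bs.length : Int)) &&
          (decide (l > 0) && b || decide (l < 0) && !b)) = decide (b = false) := by
        intro b; cases b <;> simp [hlen, hneg, haux]
      exact hd _
    · have hiff : (∃ i, i < bs.length ∧ l = (if bs.getD i false then ((i : Int) + 1) else -((i : Int) + 1)))
          ↔ False := by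
        constructor
        · rintro ⟨i, hilt, hl⟩
          by_cases hb : bs.getD i false = true <;>
            [rw [hb] at hl; rw [(by simpa using hb : bs.getD i false = false)] at hl] <;>
            simp at hl <;> omega
        · exact False.elim
      rw [habs, decide_eq_decide.mpr hiff]
      · simp [hlen]
      all_goals exact inferInstance
  · subst hzero
    have hiff : (∃ i, i < bs.length ∧ (0 : Int) = (if bs.getD i false then ((i : Int) + 1) else -((i : Int) + 1)))
        ↔ False := by
      constructor
      · rintro ⟨i, hilt, hl⟩
        by_cases hb : bs.getD i false = true <;>
          [rw [hb] at hl; rw [(by simpa using hb : bs.getD i false = false)] at hl] <;>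
          simp at hl <;> omega
      · exact False.elim
    rw [decide_eq_decide.mpr hiff]
    · simp
    all_goals exact inferInstance
  · have habs : |l| = l := abs_of_pos hpos
    by_cases hlen : (l - 1 : Int) < (bs.length : Int)
    · have hi : (l - 1).toNat < bs.length := by omega
      have hget : PySem.List.pyGetD bs (l - 1) false = bs.getD (l - 1).toNat false := by
        rw [PySem.List.pyGetD_eq_getElem bs (i := l - 1) false (by omega) hlen]
        rw [List.getD_eq_getElem bs false hi]
      have hiff : (∃ i, i < bs.length ∧ l = (if bs.getD i false then ((i : Int) + 1) else -((i : Int) + 1)))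
          ↔ bs.getD (l - 1).toNat false = true := by
        constructor
        · rintro ⟨i, hilt, hl⟩
          by_cases hb : bs.getD i false = true
          · rw [hb] at hl; simp at hl
            have : i = (l - 1).toNat := by omega
            rw [← this]; exact hb
          · rw [(by simpa using hb : bs.getD i false = false)] at hl; simp at hl; omega
        · intro hb
          exact ⟨(l - 1).toNat, hi, by rw [hb]; simp; omega⟩
      have haux : ¬ (l < 0) := by omega
      rw [habs, hget, decide_eq_decide.mpr hiff]
      have hd : ∀ (b : Bool), (decide (l - 1 < (bs.length : Int)) &&
          (decide (l > 0) && b || decide (l < 0) && !b)) = decide (b = true) := by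
        intro b; cases b <;> simp [hlen, hpos, haux]
      exact hd _
    · have hiff : (∃ i, i < bs.length ∧ l = (if bs.getD i false then ((i : Int) + 1) else -((i : Int) + 1)))
          ↔ False := by
        constructor
        · rintro ⟨i, hilt, hl⟩
          by_cases hb : bs.getD i false = true <;>
            [rw [hb] at hl; rw [(by simpa using hb : bs.getD i false = false)] at hl] <;>
            simp at hl <;> omega
        · exact False.elim
      rw [habs, decide_eq_decide.mpr hiff]
      · simp [hlen]
      all_goals exact inferInstance

-- A's inner loop: clause satisfied iff it contains the code of some satisfied variable
lemma clauseSat_char (solution : List Bool) (clause : List Int) :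
    aClauseSat solution clause
    = decide (∃ i, i < solution.length ∧
        (if solution.getD i false then ((i : Int) + 1) else -((i : Int) + 1)) ∈ clause) := by
  induction clause with
  | nil => simp [aClauseSat]
  | cons l rest ih =>
    have heq : aClauseSat solution (l :: rest) =
        (if decide ((|l| - 1 : Int) ≥ (solution.length : Int)) then aClauseSat solution rest
         else if (decide (l > 0) && PySem.List.pyGetD solution (|l| - 1) false)
              || (decide (l < 0) && !(PySem.List.pyGetD solution (|l| - 1) false)) then true
         else aClauseSat solution rest) := rfl
    have hlit := litTest_eq solution l
    have hstep : aClauseSat solution (l :: rest)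
        = ((decide ((|l| - 1 : Int) < (solution.length : Int)) &&
            ((decide (l > 0) && PySem.List.pyGetD solution (|l| - 1) false)
              || (decide (l < 0) && !(PySem.List.pyGetD solution (|l| - 1) false))))
          || aClauseSat solution rest) := by
      by_cases hlen : ((|l| - 1 : Int) ≥ (solution.length : Int))
      · simp [heq, hlen, not_lt.mpr hlen]
      · have hlt : (|l| - 1 : Int) < (solution.length : Int) := lt_of_not_ge hlen
        by_cases h : ((decide (l > 0) && PySem.List.pyGetD solution (|l| - 1) false)
            || (decide (l < 0) && !(PySem.List.pyGetD solution (|l| - 1) false))) = true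
        · simp [heq, hlen, hlt, h]
        · simp [heq, hlen, hlt, h]
    rw [hstep, hlit, ih, ← Bool.decide_or, decide_eq_decide]
    constructor
    · rintro (⟨i, hi, hl⟩ | ⟨i, hi, hmem⟩)
      · exact ⟨i, hi, by rw [← hl]; exact List.mem_cons_self⟩
      · exact ⟨i, hi, List.mem_cons_of_mem _ hmem⟩
    · rintro ⟨i, hi, hmem⟩
      rcases List.mem_cons.mp hmem with h | h
      · exact Or.inl ⟨i, hi, h.symm⟩
      · exact Or.inr ⟨i, hi, h⟩

-- membership in the enumerated clause list
lemma mem_enum_clauses (cs : List (List Int)) (s : Nat) (x : Int) (c : List Int) :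
    (x, c) ∈ PySem.List.enumerate cs ((s : Nat) : Int)
    ↔ ∃ j, j < cs.length ∧ x = ((s + j : Nat) : Int) ∧ c = cs.getD j [] := by
  induction cs generalizing s with
  | nil => simp [PySem.List.enumerate_nil]
  | cons hd tl ih =>
    have hs : (((s : Nat) : Int) + 1) = ((s + 1 : Nat) : Int) := by push_cast; ring
    rw [PySem.List.enumerate_cons, List.mem_cons, hs, ih (s + 1)]
    constructor
    · rintro (h | ⟨j, hj, hx, hc⟩)
      · exact ⟨0, by simp, by simpa using congrArg Prod.fst h, by simpa using congrArg Prod.snd h⟩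
      · exact ⟨j + 1, by simpa using hj, by rw [hx]; push_cast; ring, by simpa using hc⟩
    · rintro ⟨j, hj, hx, hc⟩
      cases j with
      | zero =>
        left; simp at hx hc; simp [hx, hc]
      | succ k =>
        right; refine ⟨k, by simpa using hj, by rw [hx]; push_cast; ring, by simpa using hc⟩

-- inverted index: x ∈ occ[l] iff x is the index of a clause containing literal l
lemma mem_occ (clauses : List (List Int)) (l x : Int) :
    x ∈ (altOcc clauses).getD l []
    ↔ ∃ j, j < clauses.length ∧ x = (j : Int) ∧ l ∈ clauses.getD j [] := by
  have hinner : ∀ (p : Int × List Int) (occ : PySem.Dict Int (List Int)),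
      p.2.foldl (fun occ literal => occ.modify literal [] (· ++ [p.1])) occ
      = (p.2.map (fun lit => (lit, p.1))).foldl (fun occ q => occ.modify q.1 [] (· ++ [q.2])) occ := by
    intro p occ; rw [List.foldl_map]
  have hocc : (altOcc clauses).getD l []
      = (((PySem.List.enumerate clauses).flatMap
            (fun p => p.2.map (fun lit => (lit, p.1)))).filter (fun q => q.1 == l)).map (·.2) := by
    unfold altOcc
    rw [funext fun occ => funext fun p => hinner p occ]
    rw [← List.foldl_flatMap]
    rw [PySem.Dict.getD_foldl_modify_append]
    simp
  rw [hocc]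
  simp only [List.mem_map, List.mem_filter, List.mem_flatMap]
  constructor
  · rintro ⟨q, ⟨⟨p, hp, hq⟩, hl⟩, hx⟩
    rcases hq with ⟨lit, hlit, hq'⟩
    subst hq'
    obtain ⟨j, hj, hfst, hsnd⟩ := (mem_enum_clauses clauses 0 p.1 p.2).mp (by
      simpa using hp)
    refine ⟨j, hj, ?_, ?_⟩
    · rw [← hx]; simpa using hfst
    · have hll : lit = l := by simpa using hl
      rw [← hsnd, ← hll]; exact hlit
  · rintro ⟨j, hj, hx, hmem⟩
    refine ⟨(l, (j : Int)), ⟨⟨((j : Int), clauses.getD j []), ?_, ⟨l, hmem, rfl⟩⟩, by simp⟩,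
      by simpa using hx.symm⟩
    have h := (mem_enum_clauses clauses 0 (j : Int) (clauses.getD j [])).mpr
      ⟨j, hj, by simp, rfl⟩
    simpa using h

-- the inner marking loop: sat[ci] = True for every ci in the list
lemma getD_setLoop (cis : List Int) (s : List Bool) (j : Nat)
    (hnn : ∀ ci ∈ cis, 0 ≤ ci) (hj : j < s.length) :
    (cis.foldl (fun s ci => PySem.List.pySetD s ci true) s).getD j false
    = (s.getD j false || cis.any (fun ci => ci == (j : Int))) := by
  induction cis generalizing s with
  | nil => simp
  | cons ci rest ih =>
    have hci : 0 ≤ ci := hnn ci List.mem_cons_self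
    have hset : PySem.List.pySetD s ci true = s.set ci.toNat true :=
      PySem.List.pySetD_of_nonneg s true hci
    rw [List.foldl_cons, ih _ (fun c hc => hnn c (List.mem_cons_of_mem _ hc))
      (by rw [hset]; simpa using hj)]
    rw [List.any_cons]
    have hentry : (PySem.List.pySetD s ci true).getD j false
        = (s.getD j false || (ci == (j : Int))) := by
      rw [hset]
      by_cases hcij : ci.toNat = j
      · have hbeq : (ci == (j : Int)) = true := by
          simp only [beq_iff_eq]; omega
        rw [hbeq]
        rw [List.getD_eq_getElem _ _ (by simpa using hj)]
        have hlt : ci.toNat < s.length := by omega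
        rw [show (s.set ci.toNat true)[j]'(by simpa using hj)
              = (s.set ci.toNat true)[ci.toNat]'(by simpa using hlt) by
            congr 1; omega]
        rw [List.getElem_set_self]
        simp
      · have hbeq : (ci == (j : Int)) = false := by
          simp only [beq_eq_false_iff_ne, ne_eq]
          intro h; omega
        rw [hbeq]
        rw [List.getD_eq_getElem _ _ (by simpa using hj),
            List.getD_eq_getElem _ _ hj]
        rw [List.getElem_set_ne (by omega)]
        simp
    rw [hentry]
    ac_rfl

lemma length_setLoop (cis : List Int) (s : List Bool) :
    (cis.foldl (fun s ci => PySem.List.pySetD s ci true) s).length = s.length := by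
  induction cis generalizing s with
  | nil => rfl
  | cons ci rest ih => rw [List.foldl_cons, ih, PySem.List.length_pySetD]

-- the outer marking loop over the enumerated assignment
lemma getD_markLoop (es : List (Int × Bool)) (occ : PySem.Dict Int (List Int)) (sat : List Bool)
    (j : Nat) (hocc : ∀ l ci, ci ∈ occ.getD l [] → 0 ≤ ci) (hj : j < sat.length) :
    (es.foldl (fun sat iv =>
        (occ.getD (if iv.2 then iv.1 + 1 else -(iv.1 + 1)) []).foldl
          (fun s ci => PySem.List.pySetD s ci true) sat) sat).getD j false
    = (sat.getD j false
        || es.any (fun iv => (occ.getD (if iv.2 then iv.1 + 1 else -(iv.1 + 1)) []).any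
            (fun ci => ci == (j : Int)))) := by
  induction es generalizing sat with
  | nil => simp
  | cons iv rest ih =>
    rw [List.foldl_cons, List.any_cons]
    rw [ih _ (by rw [length_setLoop]; exact hj)]
    rw [getD_setLoop _ _ _ (fun c hc => hocc _ c hc) hj]
    ac_rfl

lemma length_markLoop (es : List (Int × Bool)) (occ : PySem.Dict Int (List Int)) (sat : List Bool) :
    (es.foldl (fun sat iv =>
        (occ.getD (if iv.2 then iv.1 + 1 else -(iv.1 + 1)) []).foldl
          (fun s ci => PySem.List.pySetD s ci true) sat) sat).length = sat.length := by
  induction es generalizing sat with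
  | nil => rfl
  | cons iv rest ih => rw [List.foldl_cons, ih, length_setLoop]

-- any over the enumerated assignment as a bounded existential
lemma any_enum (bs : List Bool) (s : Nat) (f : Int × Bool → Bool) :
    (PySem.List.enumerate bs ((s : Nat) : Int)).any f
    = decide (∃ i, i < bs.length ∧ f (((s + i : Nat) : Int), bs.getD i false) = true) := by
  induction bs generalizing s with
  | nil => simp [PySem.List.enumerate_nil]
  | cons b bs ih =>
    have hs : (((s : Nat) : Int) + 1) = ((s + 1 : Nat) : Int) := by push_cast; ring
    rw [PySem.List.enumerate_cons, List.any_cons, hs, ih (s + 1)]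
    have hiff : (f (((s : Nat) : Int), b) = true ∨
          ∃ i, i < bs.length ∧ f (((s + 1 + i : Nat) : Int), bs.getD i false) = true)
        ↔ (∃ i, i < (b :: bs).length ∧ f (((s + i : Nat) : Int), (b :: bs).getD i false) = true) := by
      constructor
      · rintro (h | ⟨i, hi, h⟩)
        · exact ⟨0, by simp, by simpa using h⟩
        · refine ⟨i + 1, by simpa using hi, ?_⟩
          have harith : s + (i + 1) = s + 1 + i := by omega
          simpa [harith] using h
      · rintro ⟨i, hi, h⟩
        cases i with
        | zero => left; simpa using h
        | succ k =>
          right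
          refine ⟨k, by simpa using hi, ?_⟩
          have harith : s + 1 + k = s + (k + 1) := by omega
          simpa [harith] using h
    have hdec : (f (((s : Nat) : Int), b) : Bool)
        = decide (f (((s : Nat) : Int), b) = true) := by simp
    rw [hdec, ← Bool.decide_or, decide_eq_decide.mpr hiff]

-- ===== VERDICT (by name: the statement is the Claim_ definition above) =====
theorem avaliando_solucao_spec : Claim_equal_avaliando_solucao := by
  intro solution clauses _
  unfold Spec_avaliando_solucao avaliando_solucao avaliando_solucao_alt
  -- A's side: fold-count is countP
  rw [PySem.List.foldl_if_add_one]
  -- B's side: the final mark array is clauses.map (aClauseSat solution)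
  have hocc_nn : ∀ l ci, ci ∈ (altOcc clauses).getD l [] → 0 ≤ ci := by
    intro l ci h
    obtain ⟨j, _, hx, _⟩ := (mem_occ clauses l ci).mp h
    omega
  have hlen : ((PySem.List.enumerate solution).foldl
      (fun sat iv =>
        ((altOcc clauses).getD (if iv.2 then iv.1 + 1 else -(iv.1 + 1)) []).foldl
          (fun s ci => PySem.List.pySetD s ci true) sat)
      (List.replicate clauses.length false)).length = clauses.length := by
    rw [length_markLoop]; simp
  have hmap : ((PySem.List.enumerate solution).foldl
      (fun sat iv =>
        ((altOcc clauses).getD (if iv.2 then iv.1 + 1 else -(iv.1 + 1)) []).foldl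
          (fun s ci => PySem.List.pySetD s ci true) sat)
      (List.replicate clauses.length false))
      = clauses.map (aClauseSat solution) := by
    apply List.ext_getElem
    · rw [hlen]; simp
    · intro j hj1 hj2
      have hjlt : j < clauses.length := by simpa using hj2
      have hget : ∀ (xs : List Bool) (h : j < xs.length), xs[j]'h = xs.getD j false := by
        intro xs h; rw [List.getD_eq_getElem _ _ h]
      rw [hget _ hj1]
      have he : PySem.List.enumerate solution = PySem.List.enumerate solution ((0 : Nat) : Int) := by
        norm_num
      rw [he, getD_markLoop _ _ _ _ hocc_nn (by simp [hjlt])]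
      have hinit : (List.replicate clauses.length false).getD j false = false := by
        simp [List.getD_eq_getElem?_getD]
      rw [hinit, Bool.false_or]
      rw [any_enum solution 0
        (fun iv => ((altOcc clauses).getD (if iv.2 then iv.1 + 1 else -(iv.1 + 1)) []).any
          (fun ci => ci == (j : Int)))]
      rw [List.getElem_map]
      rw [clauseSat_char]
      rw [decide_eq_decide]
      have hmem_j : ∀ (l : Int), ((altOcc clauses).getD l []).any (fun ci => ci == (j : Int)) = true
          ↔ l ∈ clauses[j] := by
        intro l
        rw [List.any_eq_true]
        constructor
        · rintro ⟨ci, hci, hbeq⟩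
          have hcij : ci = (j : Int) := by simpa using hbeq
          obtain ⟨j', hj', hx, hmem'⟩ := (mem_occ clauses l ci).mp hci
          have : j' = j := by omega
          rw [← List.getD_eq_getElem clauses [] hjlt, ← this]
          exact hmem'
        · intro hmem'
          refine ⟨(j : Int), ?_, by simp⟩
          exact (mem_occ clauses l (j : Int)).mpr
            ⟨j, hjlt, rfl, by rwa [List.getD_eq_getElem clauses [] hjlt]⟩
      constructor
      · rintro ⟨i, hi, h⟩
        refine ⟨i, hi, ?_⟩
        have h' := (hmem_j _).mp (by simpa using h)
        simpa using h'
      · rintro ⟨i, hi, h⟩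
        refine ⟨i, hi, ?_⟩
        simp only [Nat.zero_add] at *
        exact (hmem_j _).mpr h
  -- counting marks equals counting satisfied clauses
  have hcount : (clauses.map (aClauseSat solution)).count true
      = clauses.countP (fun clause => aClauseSat solution clause) := by
    rw [List.count, List.countP_map]
    congr 1
    funext c
    simp [Function.comp]
  simp only [hmap, hcount]
  simp
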